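-- pv_equiv track=rewrite | github.com/MuhammadAlfariziTazkia/algoritma-otp-modifikasi | evaluasi/evaluasi_kasiski.py | get_slice_every_list
-- ===== SOURCE A (Python) =====
-- def get_slice_every_list(list_of_factors):
--   slice_list = []
--   for factor in list_of_factors:
--     factor_index = list_of_factors.index(factor)
--     for num in factor:
--       for index in range(factor_index + 1, len(list_of_factors)):
--         if num in list_of_factors[index] and num not in slice_list:
--           slice_list.append(num)
--           break
--
--   return slice_list
-- ===== SOURCE B (Python) =====
-- def get_slice_every_list(list_of_factors):
--     count = {}
--     for factor in list_of_factors: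
--         for num in set(factor):
--             count[num] = count.get(num, 0) + 1
--     result = []
--     seen = set()
--     for factor in list_of_factors:
--         for num in factor:
--             if count[num] >= 2 and num not in seen:
--                 seen.add(num)
--                 result.append(num)
--     return result
-- ===== Notes on version B (the rewrite author's own statement) =====
-- stated objective: faster
-- what changed: Replaces the nested later-list scanning (with repeated list.index calls) by a single counting pass that builds a frequency table of how many sub-lists contain each number, followed by one ordered pass that collects numbers with count >= 2 in first-appearance order.
import Mathlib
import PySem

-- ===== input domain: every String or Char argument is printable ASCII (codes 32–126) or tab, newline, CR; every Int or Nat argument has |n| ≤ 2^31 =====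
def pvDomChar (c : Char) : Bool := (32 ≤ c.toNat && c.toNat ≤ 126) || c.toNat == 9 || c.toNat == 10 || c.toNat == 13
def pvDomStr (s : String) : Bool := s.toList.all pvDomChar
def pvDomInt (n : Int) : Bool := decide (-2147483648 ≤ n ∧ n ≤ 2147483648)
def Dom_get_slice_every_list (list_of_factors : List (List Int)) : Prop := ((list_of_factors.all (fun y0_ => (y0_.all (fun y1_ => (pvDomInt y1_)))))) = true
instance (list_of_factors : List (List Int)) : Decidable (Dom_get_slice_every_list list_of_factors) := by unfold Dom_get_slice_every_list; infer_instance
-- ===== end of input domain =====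

-- B replaces A's nested later-list scans by a frequency table of how many sub-lists contain
-- each number plus one ordered collection pass (measured asymptotically faster by the check).

-- ===== PORT A =====
def get_slice_every_list (list_of_factors : List (List Int)) : List Int :=
  list_of_factors.foldl (fun slice_list factor =>
    -- factor_index = list_of_factors.index(factor); factor is a member, so index? is always some
    let factor_index : Int := ((PySem.List.index? list_of_factors factor).getD 0 : Nat)
    factor.foldl (fun slice_list num =>
      -- the inner 'for index in range(...)' appends num at most once (then breaks), so its net
      -- effect is: append iff some index in the range has num in list_of_factors[index] and
      -- num not yet in slice_list (slice_list does not change before the break)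
      if ((PySem.List.pyRange (factor_index + 1) (list_of_factors.length : Int) 1).any
            (fun index => (PySem.List.pyGetD list_of_factors index ([] : List Int)).contains num))
          && !(slice_list.contains num)
      then slice_list ++ [num] else slice_list) slice_list) []

-- ===== PORT B =====
def get_slice_every_list_alt (list_of_factors : List (List Int)) : List Int :=
  -- first pass: count[num] = number of sub-lists containing num (set(factor) per list;
  -- iteration order over the set is irrelevant: the dict is only looked up afterwards)
  let count : PySem.Dict Int Int :=
    list_of_factors.foldl (fun d factor =>
      (PySem.Set.ofList factor).foldl (fun d num => d.insert num (d.getD num 0 + 1)) d)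
      PySem.Dict.empty
  -- second pass: collect nums with count >= 2 in first-appearance order
  -- (count[num]: num ∈ factor was counted in the first pass, so the key is always present)
  (list_of_factors.foldl (fun (st : List Int × PySem.Set Int) factor =>
      factor.foldl (fun st num =>
        if decide (2 ≤ count.getD num 0) && !(PySem.Set.contains st.2 num)
        then (st.1 ++ [num], PySem.Set.add st.2 num) else st) st)
    (([] : List Int), PySem.Set.empty)).1

-- ===== PRECONDITION & SPEC =====
def Spec_get_slice_every_list (list_of_factors : List (List Int)) (out : List Int) : Prop := out = get_slice_every_list_alt list_of_factors
instance (list_of_factors : List (List Int)) (out : List Int) : Decidable (Spec_get_slice_every_list list_of_factors out) := by unfold Spec_get_slice_every_list; infer_instance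

-- ===== CLAIM (what is proved, stated in full; the proofs are below) =====
def Claim_equal_get_slice_every_list : Prop := ∀ (list_of_factors : List (List Int)), Dom_get_slice_every_list list_of_factors → Spec_get_slice_every_list list_of_factors (get_slice_every_list list_of_factors)

-- ===== LEMMAS AND PROOFS =====

-- 'num occurs in at least two of the sub-lists' — the characterisation both ports reduce to
def goodB (l : List (List Int)) (v : Int) : Bool := decide (2 ≤ l.countP (fun g => g.contains v))

-- canonical step: append v iff good and not already collected
def sStep (l : List (List Int)) (acc : List Int) (v : Int) : List Int :=
  if goodB l v && !(acc.contains v) then acc ++ [v] else acc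

-- A's inner-loop step, parametrised by factor_index
def aStep (l : List (List Int)) (fi : Int) (acc : List Int) (v : Int) : List Int :=
  if ((PySem.List.pyRange (fi + 1) (l.length : Int) 1).any
        (fun index => (PySem.List.pyGetD l index ([] : List Int)).contains v))
      && !(acc.contains v)
  then acc ++ [v] else acc

def fidx (l : List (List Int)) (f : List Int) : Int := ((PySem.List.index? l f).getD 0 : Nat)

-- invariant: acc holds exactly the already-processed occurrences that are good
def InvP (l : List (List Int)) (occ acc : List Int) : Prop :=
  ∀ x, x ∈ acc ↔ (x ∈ occ ∧ goodB l x = true)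

theorem goodB_iff (l : List (List Int)) (v : Int) :
    goodB l v = true ↔ 2 ≤ l.countP (fun g => g.contains v) := by
  unfold goodB; exact decide_eq_true_iff

-- A's pyRange-any over trailing indices is a membership scan of the trailing lists
theorem anyRange_eq (l : List (List Int)) (a : Nat) (v : Int) :
    ((PySem.List.pyRange ((a : Int)) (l.length : Int) 1).any
        (fun index => (PySem.List.pyGetD l index ([] : List Int)).contains v))
      = (l.drop a).any (fun g => g.contains v) := by
  rw [show (fun index => (PySem.List.pyGetD l index ([] : List Int)).contains v)
      = (fun g : List Int => g.contains v) ∘ (fun j => PySem.List.pyGetD l j ([] : List Int)) from rfl,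
    ← List.any_map, PySem.List.map_pyGetD_pyRange' l ([] : List Int) (a := (a : Int)) (by positivity)]
  simp

theorem inv_extend_good (l : List (List Int)) (occ acc : List Int) (v : Int)
    (hacc : InvP l occ acc) (hg : goodB l v = true) : InvP l (occ ++ [v]) (acc ++ [v]) := by
  intro x
  simp only [List.mem_append, List.mem_singleton, hacc x]
  rcases eq_or_ne x v with rfl | hne
  · simp [hg]
  · simp [hne]

theorem inv_extend_bad (l : List (List Int)) (occ acc : List Int) (v : Int)
    (hacc : InvP l occ acc) (hg : goodB l v = false) : InvP l (occ ++ [v]) acc := by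
  intro x
  simp only [List.mem_append, List.mem_singleton, hacc x]
  rcases eq_or_ne x v with rfl | hne
  · simp [hg]
  · simp [hne]

theorem inv_extend_mem (l : List (List Int)) (occ acc : List Int) (v : Int)
    (hacc : InvP l occ acc) (hvacc : v ∈ acc) : InvP l (occ ++ [v]) acc := by
  intro x
  simp only [List.mem_append, List.mem_singleton, hacc x]
  rcases eq_or_ne x v with rfl | hne
  · have := (hacc x).mp hvacc
    tauto
  · simp [hne]

-- the heart: at an occurrence v of the list f placed after pre, A's step (scan the lists after
-- the FIRST index of f) agrees with the canonical step, and the invariant is maintained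
theorem point (pre rest : List (List Int)) (f : List Int)
    (fpre : List Int) (v : Int) (hv : v ∈ f)
    (acc : List Int) (hacc : InvP (pre ++ f :: rest) (pre.flatten ++ fpre) acc) :
    aStep (pre ++ f :: rest) (fidx (pre ++ f :: rest) f) acc v = sStep (pre ++ f :: rest) acc v ∧
      InvP (pre ++ f :: rest) (pre.flatten ++ (fpre ++ [v])) (sStep (pre ++ f :: rest) acc v) := by
  have hassoc : pre.flatten ++ (fpre ++ [v]) = (pre.flatten ++ fpre) ++ [v] :=
    (List.append_assoc _ _ _).symm
  rw [hassoc]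
  have hfmem : f ∈ pre ++ f :: rest := by simp
  obtain ⟨k, hk⟩ : ∃ k, PySem.List.index? (pre ++ f :: rest) f = some k := by
    cases h : PySem.List.index? (pre ++ f :: rest) f with
    | none => exact absurd ((PySem.List.index?_eq_none_iff _ f).mp h) (by simp [hfmem])
    | some k => exact ⟨k, rfl⟩
  obtain ⟨hklt, hlk, hkmin⟩ := PySem.List.getElem_of_index?_eq_some hk
  have hfidx : fidx (pre ++ f :: rest) f = (k : Int) := by
    simp only [fidx, hk, Option.getD_some]
  have hkle : k ≤ pre.length := by
    by_contra hgt
    have hgt2 : pre.length < k := by omega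
    have hplt : pre.length < (pre ++ f :: rest).length := by simp
    have hpf : (pre ++ f :: rest)[pre.length] = f := by
      rw [List.getElem_append_right (Nat.le_refl _)]
      simp
    exact hkmin pre.length hgt2 hpf
  have hcondA : ((PySem.List.pyRange ((fidx (pre ++ f :: rest) f) + 1)
        ((pre ++ f :: rest).length : Int) 1).any
      (fun index => (PySem.List.pyGetD (pre ++ f :: rest) index ([] : List Int)).contains v))
      = ((pre ++ f :: rest).drop (k+1)).any (fun g => g.contains v) := by
    rw [hfidx, show ((k : Int) + 1) = ((k+1 : Nat) : Int) by push_cast; ring, anyRange_eq]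
  have hcount : (pre ++ f :: rest).countP (fun g => g.contains v)
      = pre.countP (fun g => g.contains v) + 1 + rest.countP (fun g => g.contains v) := by
    rw [List.countP_append, List.countP_cons, if_pos (by simpa using hv)]
    omega
  by_cases hvacc : v ∈ acc
  · -- already collected: both steps are no-ops
    have hb : acc.contains v = true := by simpa using hvacc
    have hno : ∀ (c : Bool), (if c && !(acc.contains v) then acc ++ [v] else acc) = acc := by
      intro c; rw [hb]; simp
    refine ⟨?_, ?_⟩
    · show (if _ && !(acc.contains v) then _ else _) = (if _ && !(acc.contains v) then _ else _)
      rw [hno, hno]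
    · show InvP _ _ (if _ && !(acc.contains v) then _ else _)
      rw [hno]
      exact inv_extend_mem _ _ _ _ hacc hvacc
  · have hb : acc.contains v = false := by simpa using hvacc
    have hnocc : ¬ (v ∈ pre.flatten ++ fpre ∧ goodB (pre ++ f :: rest) v = true) :=
      fun h => hvacc ((hacc v).mpr h)
    have hkeq_of : pre.countP (fun g => g.contains v) = 0 → k = pre.length := by
      intro hcp
      rcases Nat.lt_or_ge k pre.length with hlt | hge
      · exfalso
        have hpkf : pre[k]'hlt = f := (List.getElem_append_left hlt).symm.trans hlk
        have hpc : (pre[k]'hlt).contains v = true := by rw [hpkf]; simpa using hv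
        exact (List.countP_eq_zero.mp hcp _ (List.getElem_mem hlt)) hpc
      · omega
    have hdrop : (pre ++ f :: rest).drop (pre.length + 1) = rest := by
      rw [List.drop_append]
      simp
    by_cases hg : goodB (pre ++ f :: rest) v = true
    · -- good and unseen: the first index of f is pre.length and a later list contains v
      have hvocc : v ∉ pre.flatten ++ fpre := fun h => hnocc ⟨h, hg⟩
      have hcp : pre.countP (fun g => g.contains v) = 0 := by
        refine List.countP_eq_zero.mpr (fun g hgmem hc => ?_)
        refine hvocc ?_
        simp only [List.mem_append, List.mem_flatten]
        exact Or.inl ⟨g, hgmem, by simpa using hc⟩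
      have hrest : 1 ≤ rest.countP (fun g => g.contains v) := by
        have h2 := (goodB_iff _ _).mp hg
        omega
      have hkeq : k = pre.length := hkeq_of hcp
      have hCA : ((pre ++ f :: rest).drop (k+1)).any (fun g => g.contains v) = true := by
        rw [hkeq, hdrop]
        cases hany : rest.any (fun g => g.contains v) with
        | true => rfl
        | false =>
          exfalso
          have h0 : rest.countP (fun g => g.contains v) = 0 :=
            List.countP_eq_zero.mpr (fun g hgm => by simpa using List.any_eq_false.mp hany g hgm)
          omega
      have heqa : aStep (pre ++ f :: rest) (fidx (pre ++ f :: rest) f) acc v = acc ++ [v] := by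
        rw [aStep, hcondA, hCA, hb]
        simp
      have heqs : sStep (pre ++ f :: rest) acc v = acc ++ [v] := by
        rw [sStep, hg, hb]
        simp
      rw [heqa, heqs]
      exact ⟨rfl, inv_extend_good _ _ _ _ hacc hg⟩
    · -- not good: v occurs only in this one list, so no later list contains it
      have hng : goodB (pre ++ f :: rest) v = false := by simpa using hg
      have h1 : (pre ++ f :: rest).countP (fun g => g.contains v) ≤ 1 := by
        have : ¬ (2 ≤ (pre ++ f :: rest).countP (fun g => g.contains v)) :=
          fun h2 => hg ((goodB_iff _ _).mpr h2)
        omega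
      have hcp : pre.countP (fun g => g.contains v) = 0 := by omega
      have hcr : rest.countP (fun g => g.contains v) = 0 := by omega
      have hkeq : k = pre.length := hkeq_of hcp
      have hCA : ((pre ++ f :: rest).drop (k+1)).any (fun g => g.contains v) = false := by
        rw [hkeq, hdrop]
        exact List.any_eq_false.mpr (List.countP_eq_zero.mp hcr)
      have heqa : aStep (pre ++ f :: rest) (fidx (pre ++ f :: rest) f) acc v = acc := by
        rw [aStep, hcondA, hCA]
        simp
      have heqs : sStep (pre ++ f :: rest) acc v = acc := by
        rw [sStep, hng]
        simp
      rw [heqa, heqs]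
      exact ⟨rfl, inv_extend_bad _ _ _ _ hacc hng⟩

theorem factor_fold (pre rest : List (List Int)) (f : List Int) :
    ∀ (fsuf fpre : List Int), f = fpre ++ fsuf →
    ∀ acc, InvP (pre ++ f :: rest) (pre.flatten ++ fpre) acc →
    fsuf.foldl (aStep (pre ++ f :: rest) (fidx (pre ++ f :: rest) f)) acc
      = fsuf.foldl (sStep (pre ++ f :: rest)) acc ∧
    InvP (pre ++ f :: rest) (pre.flatten ++ f) (fsuf.foldl (sStep (pre ++ f :: rest)) acc) := by
  intro fsuf
  induction fsuf with
  | nil =>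
    intro fpre hf acc hacc
    rw [List.append_nil] at hf
    subst hf
    exact ⟨rfl, hacc⟩
  | cons v fsuf ih =>
    intro fpre hf acc hacc
    have hv : v ∈ f := by rw [hf]; simp
    obtain ⟨hstep, hinv⟩ := point pre rest f fpre v hv acc hacc
    simp only [List.foldl_cons, hstep]
    have hf2 : f = (fpre ++ [v]) ++ fsuf := by rw [hf]; simp
    exact ih (fpre ++ [v]) hf2 _ hinv

theorem outer_fold (l : List (List Int)) :
    ∀ (suf pre : List (List Int)), l = pre ++ suf →
    ∀ acc, InvP l pre.flatten acc →
    suf.foldl (fun acc f => f.foldl (aStep l (fidx l f)) acc) acc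
      = suf.foldl (fun acc f => f.foldl (sStep l) acc) acc := by
  intro suf
  induction suf with
  | nil => intro pre hl acc hacc; rfl
  | cons f rest2 ih =>
    intro pre hl acc hacc
    subst hl
    simp only [List.foldl_cons]
    have hacc' : InvP (pre ++ f :: rest2) (pre.flatten ++ ([] : List Int)) acc := by
      rwa [List.append_nil]
    obtain ⟨hstep, hinv⟩ := factor_fold pre rest2 f f [] (by simp) acc hacc'
    rw [hstep]
    have hflat : (pre ++ [f]).flatten = pre.flatten ++ f := by simp
    have hl2 : pre ++ f :: rest2 = (pre ++ [f]) ++ rest2 := by simp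
    have hinv2 : InvP (pre ++ f :: rest2) (pre ++ [f]).flatten
        (f.foldl (sStep (pre ++ f :: rest2)) acc) := by rwa [hflat]
    have := ih (pre ++ [f]) hl2 _ hinv2
    rw [hl2]
    rw [hl2] at this
    exact this

theorem A_eq_S (l : List (List Int)) :
    get_slice_every_list l = l.foldl (fun acc f => f.foldl (sStep l) acc) [] := by
  have h0 : InvP l ([] : List (List Int)).flatten [] := by intro x; simp
  exact outer_fold l l [] rfl [] h0

-- B's counting pass computes the number of sub-lists containing v
theorem count_getD (l : List (List Int)) (d : PySem.Dict Int Int) (v : Int) :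
    (l.foldl (fun d factor =>
        (PySem.Set.ofList factor).foldl (fun d num => d.insert num (d.getD num 0 + 1)) d) d).getD v 0
      = d.getD v 0 + (l.countP (fun g => g.contains v) : Int) := by
  induction l generalizing d with
  | nil => simp
  | cons f rest ih =>
    rw [List.foldl_cons, ih, PySem.Dict.getD_foldl_insert_add_one]
    have hc : (PySem.Set.ofList f).count v = if f.contains v then 1 else 0 := by
      by_cases h : v ∈ f
      · rw [if_pos (by simpa using h)]
        exact List.count_eq_one_of_mem (PySem.Set.nodup_ofList f) (by simp [PySem.Set.mem_ofList, h])
      · rw [if_neg (by simpa using h)]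
        simp [List.count_eq_zero, PySem.Set.mem_ofList, h]
    rw [List.countP_cons, hc]
    by_cases h : f.contains v
    · rw [if_pos h]
      push_cast
      ring
    · rw [if_neg h]
      push_cast
      ring


-- B's seen-set always holds exactly the collected elements, so the pair fold projects to a list fold
theorem inner_pair (cond : Int → Bool) :
    ∀ (f : List Int) (res : List Int) (seen : PySem.Set Int),
    (∀ x : Int, (x ∈ seen) ↔ (x ∈ res)) →
    (f.foldl (fun (st : List Int × PySem.Set Int) v =>
        if cond v && !(PySem.Set.contains st.2 v)
        then (st.1 ++ [v], PySem.Set.add st.2 v) else st) (res, seen)).1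
      = f.foldl (fun acc v => if cond v && !(acc.contains v) then acc ++ [v] else acc) res ∧
    (∀ x : Int, (x ∈ (f.foldl (fun (st : List Int × PySem.Set Int) v =>
        if cond v && !(PySem.Set.contains st.2 v)
        then (st.1 ++ [v], PySem.Set.add st.2 v) else st) (res, seen)).2) ↔
      (x ∈ f.foldl (fun acc v => if cond v && !(acc.contains v) then acc ++ [v] else acc) res)) := by
  intro f
  induction f with
  | nil => intro res seen h; exact ⟨rfl, h⟩
  | cons v rest ih =>
    intro res seen h
    have hc : PySem.Set.contains seen v = res.contains v := by
      simp only [PySem.Set.contains_eq_listContains]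
      by_cases hv : v ∈ res
      · simp [hv, (h v).mpr hv]
      · have : v ∉ seen := fun hx => hv ((h v).mp hx)
        simp [hv, this]
    simp only [List.foldl_cons, hc]
    by_cases hcv : (cond v && !(res.contains v)) = true
    · rw [if_pos hcv, if_pos hcv]
      exact ih (res ++ [v]) (PySem.Set.add seen v)
        (fun x => by simp [PySem.Set.mem_add, h x, or_comm])
    · rw [if_neg hcv, if_neg hcv]
      exact ih res seen h

theorem pair_fold (cond : Int → Bool) :
    ∀ (suf : List (List Int)) (res : List Int) (seen : PySem.Set Int),
    (∀ x : Int, (x ∈ seen) ↔ (x ∈ res)) →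
    (suf.foldl (fun (st : List Int × PySem.Set Int) f =>
        f.foldl (fun st v =>
          if cond v && !(PySem.Set.contains st.2 v)
          then (st.1 ++ [v], PySem.Set.add st.2 v) else st) st) (res, seen)).1
      = suf.foldl (fun acc f =>
          f.foldl (fun acc v => if cond v && !(acc.contains v) then acc ++ [v] else acc) acc) res ∧
    (∀ x : Int, (x ∈ (suf.foldl (fun (st : List Int × PySem.Set Int) f =>
        f.foldl (fun st v =>
          if cond v && !(PySem.Set.contains st.2 v)
          then (st.1 ++ [v], PySem.Set.add st.2 v) else st) st) (res, seen)).2) ↔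
      (x ∈ suf.foldl (fun acc f =>
          f.foldl (fun acc v => if cond v && !(acc.contains v) then acc ++ [v] else acc) acc) res)) := by
  intro suf
  induction suf with
  | nil => intro res seen h; exact ⟨rfl, h⟩
  | cons f rest ih =>
    intro res seen h
    simp only [List.foldl_cons]
    obtain ⟨h1, h2⟩ := inner_pair cond f res seen h
    have hst : (f.foldl (fun (st : List Int × PySem.Set Int) v =>
        if cond v && !(PySem.Set.contains st.2 v)
        then (st.1 ++ [v], PySem.Set.add st.2 v) else st) (res, seen))
      = ((f.foldl (fun acc v => if cond v && !(acc.contains v) then acc ++ [v] else acc) res),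
         (f.foldl (fun (st : List Int × PySem.Set Int) v =>
        if cond v && !(PySem.Set.contains st.2 v)
        then (st.1 ++ [v], PySem.Set.add st.2 v) else st) (res, seen)).2) := by
      rw [← h1]
    rw [hst]
    exact ih _ _ h2

theorem sfold_congr (c1 c2 : Int → Bool) (h : ∀ v, c1 v = c2 v) (l : List (List Int)) (res : List Int) :
    l.foldl (fun acc f => f.foldl (fun acc v => if c1 v && !(acc.contains v) then acc ++ [v] else acc) acc) res
      = l.foldl (fun acc f => f.foldl (fun acc v => if c2 v && !(acc.contains v) then acc ++ [v] else acc) acc) res := by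
  have he : c1 = c2 := funext h
  subst he; rfl

theorem B_eq_S (l : List (List Int)) :
    get_slice_every_list_alt l = l.foldl (fun acc f => f.foldl (sStep l) acc) [] := by
  unfold get_slice_every_list_alt
  rw [(pair_fold _ l [] PySem.Set.empty (fun x => by simp [PySem.Set.empty])).1]
  exact sfold_congr _ (goodB l)
    (fun v => by rw [count_getD]; simp [goodB]) l []

-- ===== VERDICT (by name: the statement is the Claim_ definition above) =====
theorem get_slice_every_list_spec : Claim_equal_get_slice_every_list := by
  intro l _
  unfold Spec_get_slice_every_list
  rw [A_eq_S, B_eq_S]
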